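-- pv_equiv track=rewrite | github.com/gagnaglimufelag-islands/Public-Challenges | 2023/Finals/rev/nice-to-meerT-you/server.py | valid_key
-- ===== SOURCE A (Python) =====
-- def valid_key(key):
--     words = key.split("_")
--     if len(words) != 10:
--         return False
--
--     for word in words[1::]:
--         if word == words[0]:
--             return False
--
--     for word in words:
--         if word != "".join(sorted(word)):
--             return False
--         if len(word) < 5:
--             return False
--
--     return True
-- ===== SOURCE B (Python) =====
-- def valid_key(key):
--     words = key.split("_")
--     if len(words) != 10:
--         return False
--     first = words[0]
--     if any(w == first for w in words[1:]):
--         return False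
--     return all(
--         len(w) >= 5 and all(a <= b for a, b in zip(w, w[1:]))
--         for w in words
--     )
-- ===== Notes on version B (the rewrite author's own statement) =====
-- stated objective: idiomatic
-- what changed: Replaces the sort-and-compare sortedness test (which joined each word's sorted characters into a new string) by a direct adjacent-pair scan zip(w, w[1:]), and folds the early-return loops into any/all expressions.
import Mathlib
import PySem

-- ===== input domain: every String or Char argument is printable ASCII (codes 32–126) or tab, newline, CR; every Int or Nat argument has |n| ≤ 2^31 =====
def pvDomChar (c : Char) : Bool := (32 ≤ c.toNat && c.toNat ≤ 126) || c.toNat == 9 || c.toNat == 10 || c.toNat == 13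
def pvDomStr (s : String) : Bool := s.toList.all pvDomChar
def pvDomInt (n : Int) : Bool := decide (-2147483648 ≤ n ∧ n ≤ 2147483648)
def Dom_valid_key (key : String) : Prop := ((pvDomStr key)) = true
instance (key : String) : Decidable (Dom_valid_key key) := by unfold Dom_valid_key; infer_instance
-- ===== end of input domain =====

-- B replaces A's per-word sort-and-compare ("".join(sorted(word))) by an adjacent-pair scan; idiomatic, same results.

-- ===== PORT A =====
-- string equality with "".join(sorted(word)) is compared via the character lists — exact
def valid_key (key : String) : Bool :=
  let words := (PySem.Str.split? key "_").getD []
  if words.length ≠ 10 then false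
  else if (words.drop 1).any (fun w => w == words.headD "") then false
  else words.all (fun w =>
    if w.toList ≠ PySem.List.sorted w.toList (fun c => c) false then false
    else if PySem.Str.len w < 5 then false
    else true)

-- ===== PORT B =====
def valid_key_alt (key : String) : Bool :=
  let words := (PySem.Str.split? key "_").getD []
  if words.length ≠ 10 then false
  else
    let first := words.headD ""
    if (words.drop 1).any (fun w => w == first) then false
    else words.all (fun w =>
      decide (5 ≤ PySem.Str.len w) &&
      ((w.toList.zip (w.toList.drop 1)).all (fun p => decide (p.1 ≤ p.2))))

-- ===== PRECONDITION & SPEC =====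
def Spec_valid_key (key : String) (out : Bool) : Prop := out = valid_key_alt key
instance (key : String) (out : Bool) : Decidable (Spec_valid_key key out) := by unfold Spec_valid_key; infer_instance

-- ===== CLAIM (what is proved, stated in full; the proofs are below) =====
def Claim_equal_valid_key : Prop := ∀ (key : String), Dom_valid_key key → Spec_valid_key key (valid_key key)

-- ===== LEMMAS AND PROOFS =====

-- adjacent-pair scan = IsChain (· ≤ ·)
theorem adj_iff_chain (l : List Char) :
    ((l.zip (l.drop 1)).all (fun p => decide (p.1 ≤ p.2)) = true) ↔ l.IsChain (· ≤ ·) := by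
  induction l with
  | nil => simp
  | cons a t ih =>
    cases t with
    | nil => simp
    | cons b u =>
      simp only [List.drop, List.zip_cons_cons, List.all_cons, Bool.and_eq_true,
        decide_eq_true_eq, List.isChain_cons_cons] at *
      exact and_congr Iff.rfl ih

-- word equals its sorted self iff adjacent pairs are ordered
theorem sorted_self_iff_adj (l : List Char) :
    (l = PySem.List.sorted l (fun c => c) false) ↔
      ((l.zip (l.drop 1)).all (fun p => decide (p.1 ≤ p.2)) = true) := by
  rw [adj_iff_chain, List.isChain_iff_pairwise]
  constructor
  · intro h
    have hp := PySem.List.sorted_pairwise (xs := l) (key := fun c : Char => c)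
    rw [← h] at hp
    exact hp
  · intro hp
    exact (PySem.List.sorted_eq_self_of_pairwise l (fun c : Char => c) hp).symm

-- the two per-word predicates agree
theorem perword_eq (w : String) :
    (if w.toList ≠ PySem.List.sorted w.toList (fun c => c) false then false
     else if PySem.Str.len w < 5 then false else true)
      = (decide (5 ≤ PySem.Str.len w) &&
         ((w.toList.zip (w.toList.drop 1)).all (fun p => decide (p.1 ≤ p.2)))) := by
  by_cases h : w.toList = PySem.List.sorted w.toList (fun c => c) false
  · have hadj := (sorted_self_iff_adj w.toList).mp h
    rw [hadj, Bool.and_true, if_neg (not_not_intro h)]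
    by_cases hl : PySem.Str.len w < 5
    · rw [if_pos hl]
      exact (decide_eq_false (by omega)).symm
    · rw [if_neg hl]
      exact (decide_eq_true (by omega)).symm
  · have hadj : ((w.toList.zip (w.toList.drop 1)).all (fun p => decide (p.1 ≤ p.2))) = false :=
      Bool.eq_false_iff.mpr (fun hc => h ((sorted_self_iff_adj w.toList).mpr hc))
    rw [if_pos h, hadj, Bool.and_false]

-- ===== VERDICT (by name: the statement is the Claim_ definition above) =====
theorem valid_key_spec : Claim_equal_valid_key := by
  intro key _
  unfold Spec_valid_key valid_key valid_key_alt
  simp only [funext perword_eq]
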